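-- pv_equiv track=rewrite | github.com/LizKodjo/Website_projects | PipelineScanner/src/utils/fix_generator.py | fix_outdated_action
-- ===== SOURCE A (Python) =====
-- def fix_outdated_action(config_content: str, platform: str) -> str:
--     """Update outdated GitHub Actions"""
--     action_updates = {
--         'actions/checkout@v1': 'actions/checkout@v4',
--         'actions/checkoout@v2': 'actions/checkout@v4',
--         'actions/setup-node@v1': 'actions/setup-node@v4',
--         'actions/upload-artifact@v1': 'actions/upload-artifact@v4',
--         'actions/download-artifact@v1': 'actions/download-artifact@v4',
--     }
--
--     fixed_content = config_content
--     for old, new in action_updates.items():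
--         fixed_content = fixed_content.replace(old, new)
--
--     return fixed_content
-- ===== SOURCE B (Python) =====
-- def fix_outdated_action(config_content: str, platform: str) -> str:
--     """Update outdated GitHub Actions.
--
--     Only the constants table below is shared with the original; the algorithm is
--     different: one left-to-right scan substituting every outdated name in a single
--     pass, instead of one full replace() pass per table entry.
--     """
--     action_updates = {
--         'actions/checkout@v1': 'actions/checkout@v4',
--         'actions/checkoout@v2': 'actions/checkout@v4',
--         'actions/setup-node@v1': 'actions/setup-node@v4',
--         'actions/upload-artifact@v1': 'actions/upload-artifact@v4',
--         'actions/download-artifact@v1': 'actions/download-artifact@v4',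
--     }
--
--     out = []
--     i = 0
--     n = len(config_content)
--     while i < n:
--         for old, new in action_updates.items():
--             if config_content.startswith(old, i):
--                 out.append(new)
--                 i += len(old)
--                 break
--         else:
--             out.append(config_content[i])
--             i += 1
--     return ''.join(out)
-- ===== Notes on version B (the rewrite author's own statement) =====
-- stated objective: alternative
-- what changed: A makes five sequential full-string replace passes (one per dict entry); B makes one left-to-right scan that substitutes all five outdated action names simultaneously, emitting the replacement for the first table key matching at each position.
import Mathlib
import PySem

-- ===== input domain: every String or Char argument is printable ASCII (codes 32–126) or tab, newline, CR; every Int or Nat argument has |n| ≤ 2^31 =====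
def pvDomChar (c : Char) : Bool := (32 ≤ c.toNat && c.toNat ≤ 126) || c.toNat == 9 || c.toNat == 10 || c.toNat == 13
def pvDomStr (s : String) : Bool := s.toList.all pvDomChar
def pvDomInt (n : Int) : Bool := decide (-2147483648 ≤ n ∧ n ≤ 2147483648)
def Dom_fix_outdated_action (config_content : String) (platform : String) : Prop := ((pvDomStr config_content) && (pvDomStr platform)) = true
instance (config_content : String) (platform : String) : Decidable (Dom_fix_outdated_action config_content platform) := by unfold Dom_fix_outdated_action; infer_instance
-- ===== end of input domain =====

-- B replaces A's five sequential full-string `replace` passes by a single left-to-right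
-- scan that substitutes all five outdated action names in one traversal (objective:
-- alternative single-pass algorithm; same results, proved equal for every input).

-- ===== PORT A =====
-- Python A: a dict literal of updates, then `for old, new in action_updates.items():
-- fixed_content = fixed_content.replace(old, new)`.
def fix_outdated_action (config_content : String) (platform : String) : String :=
  let action_updates : PySem.Dict String String := PySem.Dict.mk
    [("actions/checkout@v1", "actions/checkout@v4"),
     ("actions/checkoout@v2", "actions/checkout@v4"),
     ("actions/setup-node@v1", "actions/setup-node@v4"),
     ("actions/upload-artifact@v1", "actions/upload-artifact@v4"),
     ("actions/download-artifact@v1", "actions/download-artifact@v4")]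
  action_updates.items.foldl
    (fun fixed_content p => PySem.Str.replace fixed_content p.1 p.2) config_content

-- ===== PORT B =====
-- Source B: the same constant table, then ONE scan over the input; at each position the
-- first matching outdated name is emitted as its replacement (skipping its length),
-- otherwise the character is copied.
def pvRules : List (List Char × List Char) :=
  [("actions/checkout@v1".toList, "actions/checkout@v4".toList),
   ("actions/checkoout@v2".toList, "actions/checkout@v4".toList),
   ("actions/setup-node@v1".toList, "actions/setup-node@v4".toList),
   ("actions/upload-artifact@v1".toList, "actions/upload-artifact@v4".toList),
   ("actions/download-artifact@v1".toList, "actions/download-artifact@v4".toList)]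

-- first rule whose (nonempty) key is a prefix of s — Source B's inner `for`/`startswith` loop
def pvFirstRule (rules : List (List Char × List Char)) (s : List Char) :
    Option (List Char × List Char) :=
  rules.find? (fun r => !r.1.isEmpty && r.1.isPrefixOf s)

-- Source B's while-loop: `i += len(old)` is rendered as consuming the head char plus
-- `len(old) - 1` more (identical since matched keys are nonempty).
def pvMulti (rules : List (List Char × List Char)) : List Char → List Char
  | [] => []
  | c :: t =>
    match pvFirstRule rules (c :: t) with
    | some r => r.2 ++ pvMulti rules (List.drop (r.1.length - 1) t)
    | none => c :: pvMulti rules t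
termination_by s => s.length
decreasing_by
  all_goals simp [List.length_drop]
  all_goals omega

def fix_outdated_action_alt (config_content : String) (platform : String) : String :=
  String.ofList (pvMulti pvRules config_content.toList)

-- ===== PRECONDITION & SPEC =====
def Spec_fix_outdated_action (config_content : String) (platform : String) (out : String) : Prop := out = fix_outdated_action_alt config_content platform
instance (config_content : String) (platform : String) (out : String) : Decidable (Spec_fix_outdated_action config_content platform out) := by unfold Spec_fix_outdated_action; infer_instance

-- ===== CLAIM (what is proved, stated in full; the proofs are below) =====
def Claim_equal_fix_outdated_action : Prop := ∀ (config_content : String) (platform : String), Dom_fix_outdated_action config_content platform → Spec_fix_outdated_action config_content platform (fix_outdated_action config_content platform)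

-- ===== LEMMAS AND PROOFS =====

-- equations of pvMulti
theorem pvMulti_nil (rules : List (List Char × List Char)) : pvMulti rules [] = [] := by
  simp [pvMulti]

theorem pvMulti_match {rules : List (List Char × List Char)} {s : List Char}
    {r : List Char × List Char} (hs : s ≠ []) (h : pvFirstRule rules s = some r)
    (hr : r.1 ≠ []) :
    pvMulti rules s = r.2 ++ pvMulti rules (List.drop r.1.length s) := by
  cases s with
  | nil => exact absurd rfl hs
  | cons c t =>
    rw [pvMulti, h]
    obtain ⟨m, hm⟩ : ∃ m, r.1.length = m + 1 := by
      cases hl : r.1.length with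
      | zero => exact absurd (List.eq_nil_of_length_eq_zero hl) hr
      | succ m => exact ⟨m, rfl⟩
    simp [hm]

theorem pvMulti_nomatch {rules : List (List Char × List Char)} {c : Char} {t : List Char}
    (h : pvFirstRule rules (c :: t) = none) :
    pvMulti rules (c :: t) = c :: pvMulti rules t := by
  rw [pvMulti, h]

-- a prefix of an append is comparable with the left part
theorem pv_prefix_append_cases {k a z : List Char} (h : k <+: a ++ z) :
    k <+: a ∨ a <+: k :=
  List.prefix_or_prefix_of_prefix h (List.prefix_append a z)

theorem pvFirstRule_none {rules : List (List Char × List Char)} {s : List Char}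
    (h : ∀ r ∈ rules, ¬ r.1 <+: s) : pvFirstRule rules s = none := by
  rw [pvFirstRule, List.find?_eq_none]
  intro r hr
  simp only [Bool.and_eq_true, Bool.not_eq_true', List.isPrefixOf_iff_prefix]
  intro hc
  exact absurd hc.2 (h r hr)

-- with pairwise non-prefix keys, the matching rule is found wherever its key is a prefix
theorem pvFirstRule_mem {K : List (List Char × List Char)} {kj nj : List Char}
    {s : List Char}
    (hpw : K.Pairwise (fun a b => ¬ a.1 <+: b.1 ∧ ¬ b.1 <+: a.1))
    (hmem : (kj, nj) ∈ K) (hkj : kj ≠ []) (hp : kj <+: s) :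
    pvFirstRule K s = some (kj, nj) := by
  induction K with
  | nil => cases hmem
  | cons r K' ih =>
    rcases List.pairwise_cons.mp hpw with ⟨hhead, htail⟩
    cases hmem with
    | head =>
      rw [pvFirstRule, List.find?_cons]
      have : (!kj.isEmpty && kj.isPrefixOf s) = true := by
        simp [List.isPrefixOf_iff_prefix, hp, hkj]
      simp only [this]
    | tail _ hmem' =>
      have hnp : ¬ r.1 <+: s := by
        intro hrp
        rcases List.prefix_or_prefix_of_prefix hrp hp with h1 | h1
        · exact (hhead (kj, nj) hmem').1 h1
        · exact (hhead (kj, nj) hmem').2 h1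
      have hone : r.1.isPrefixOf s = false := by
        rw [Bool.eq_false_iff, Ne, List.isPrefixOf_iff_prefix]; exact hnp
      have : (!r.1.isEmpty && r.1.isPrefixOf s) = false := by simp [hone]
      rw [pvFirstRule, List.find?_cons, this]
      exact ih htail hmem'

-- the scan passes verbatim over a block in which no rule can match
theorem pvSkip (rules : List (List Char × List Char)) (a z : List Char)
    (h : ∀ p < a.length, ∀ r ∈ rules, ¬ r.1 <+: (a.drop p ++ z)) :
    pvMulti rules (a ++ z) = a ++ pvMulti rules z := by
  induction a with
  | nil => simp
  | cons c m ih =>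
    have h0 : pvFirstRule rules (c :: (m ++ z)) = none := by
      apply pvFirstRule_none
      intro r hr
      have := h 0 (by simp) r hr
      simpa using this
    have : pvMulti rules ((c :: m) ++ z) = c :: pvMulti rules (m ++ z) := by
      simpa using pvMulti_nomatch h0
    have hrec := ih (fun p hp r hr => by
      have := h (p + 1) (by simp; omega) r hr
      simpa using this)
    rw [this, hrec]
    simp

-- substituting one rule never creates a new occurrence of (a suffix of) any key of K
theorem pvNoCreate (k n : List Char) (K : List (List Char × List Char)) (hk : k ≠ [])
    (hsuf : ∀ r ∈ K, ∀ d < r.1.length, ¬ (r.1.drop d) <+: n ∧ ¬ n <+: (r.1.drop d)) :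
    ∀ (N : Nat) (s w : List Char), s.length ≤ N →
      (∃ r ∈ K, ∃ d, d < r.1.length ∧ w = r.1.drop d) →
      w <+: pvMulti [(k, n)] s → w <+: s := by
  intro N
  induction N with
  | zero =>
    intro s w hs hw hp
    have hsnil : s = [] := by cases s <;> simp_all
    subst hsnil
    rw [pvMulti_nil] at hp
    obtain ⟨r, hr, d, hd, hwd⟩ := hw
    have hwne : w ≠ [] := by
      subst hwd
      simp [← List.length_pos_iff, List.length_drop]
      omega
    exact absurd (List.prefix_nil.mp hp) hwne
  | succ N ihN =>
    intro s w hs hw hp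
    obtain ⟨r, hr, d, hd, hwd⟩ := hw
    have hwne : w ≠ [] := by
      subst hwd
      simp [← List.length_pos_iff, List.length_drop]
      omega
    cases s with
    | nil =>
      rw [pvMulti_nil] at hp
      exact absurd (List.prefix_nil.mp hp) hwne
    | cons c t =>
      cases hF : pvFirstRule [(k, n)] (c :: t) with
      | some r' =>
        have hr' : r' = (k, n) := by
          have := List.mem_of_find?_eq_some hF
          simpa using this
        subst hr'
        rw [pvMulti_match (by simp) hF hk] at hp
        subst hwd
        rcases pv_prefix_append_cases hp with h1 | h1
        · exact absurd h1 (hsuf r hr d hd).1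
        · exact absurd h1 (hsuf r hr d hd).2
      | none =>
        rw [pvMulti_nomatch hF] at hp
        cases w with
        | nil => exact absurd rfl hwne
        | cons w0 w' =>
          rcases List.cons_prefix_cons.mp hp with ⟨hc, hp'⟩
          subst hc
          by_cases hw' : w' = []
          · subst hw'
            exact List.cons_prefix_cons.mpr ⟨rfl, List.nil_prefix⟩
          · have hdrop : w' = r.1.drop (d + 1) := by
              have h1 : (w0 :: w').drop 1 = w' := rfl
              rw [hwd, List.drop_drop] at h1
              exact h1.symm
            have hd1 : d + 1 < r.1.length := by
              by_contra hcon
              have : r.1.drop (d + 1) = [] := List.drop_eq_nil_of_le (by omega)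
              exact hw' (hdrop.trans this)
            have hlt : t.length ≤ N := by simp at hs; omega
            have := ihN t w' hlt ⟨r, hr, d + 1, hd1, hdrop⟩ hp'
            exact List.cons_prefix_cons.mpr ⟨rfl, this⟩

-- MAIN LEMMA: one more sequential replace pass before a simultaneous scan over the
-- remaining rules equals the simultaneous scan over all rules, given the concrete
-- non-overlap facts about the keys and the replacement text.
theorem pvM (k n : List Char) (K : List (List Char × List Char))
    (hk : k ≠ [])
    (hKne : ∀ r ∈ K, r.1 ≠ [])
    (hpw : K.Pairwise (fun a b => ¬ a.1 <+: b.1 ∧ ¬ b.1 <+: a.1))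
    (hpair : ∀ r ∈ K, ¬ r.1 <+: k ∧ ¬ k <+: r.1)
    (hskipn : ∀ r ∈ K, ∀ p < n.length, ¬ r.1 <+: n.drop p ∧ ¬ n.drop p <+: r.1)
    (hsuf : ∀ r ∈ K, ∀ d < r.1.length, ¬ (r.1.drop d) <+: n ∧ ¬ n <+: (r.1.drop d))
    (hsufk : ∀ r ∈ K, ∀ d < r.1.length, 0 < d → ¬ k <+: r.1.drop d ∧ ¬ r.1.drop d <+: k) :
    ∀ (N : Nat) (s : List Char), s.length ≤ N →
      pvMulti K (pvMulti [(k, n)] s) = pvMulti ((k, n) :: K) s := by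
  intro N
  induction N with
  | zero =>
    intro s hs
    have hsnil : s = [] := by cases s <;> simp_all
    subst hsnil
    simp [pvMulti_nil]
  | succ N ihN =>
    intro s hs
    cases hsc : s with
    | nil => simp [pvMulti_nil]
    | cons c t =>
      subst hsc
      by_cases hkp : k <+: c :: t
      · -- case A: k matches at the front
        obtain ⟨u, hu⟩ := hkp
        have hF1 : pvFirstRule [(k, n)] (c :: t) = some (k, n) := by
          rw [pvFirstRule, List.find?_cons]
          have : (!k.isEmpty && k.isPrefixOf (c :: t)) = true := by
            simp [List.isPrefixOf_iff_prefix, hk, ← hu]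
          simp only [this]
        have hstep : pvMulti [(k, n)] (c :: t) = n ++ pvMulti [(k, n)] u := by
          rw [pvMulti_match (by simp) hF1 hk, ← hu]
          simp [List.drop_left]
        have hulen : u.length ≤ N := by
          have := congrArg List.length hu
          simp at this hs
          have hk1 : 1 ≤ k.length := by
            cases k with | nil => exact absurd rfl hk | cons a b => simp
          omega
        have hskip : pvMulti K (n ++ pvMulti [(k, n)] u) =
            n ++ pvMulti K (pvMulti [(k, n)] u) := by
          apply pvSkip
          intro p hp r hr hcon
          rcases pv_prefix_append_cases hcon with h1 | h1
          · exact (hskipn r hr p hp).1 h1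
          · exact (hskipn r hr p hp).2 h1
        have hF2 : pvFirstRule ((k, n) :: K) (c :: t) = some (k, n) := by
          rw [pvFirstRule, List.find?_cons]
          have : (!k.isEmpty && k.isPrefixOf (c :: t)) = true := by
            simp [List.isPrefixOf_iff_prefix, hk, ← hu]
          simp only [this]
        rw [hstep, hskip, ihN u hulen,
          pvMulti_match (by simp) hF2 hk, ← hu, List.drop_left]
      · -- k does not match; which rule of K matches, if any?
        cases hFK : pvFirstRule K (c :: t) with
        | some rj =>
          -- case B: rule rj of K matches at the front
          obtain ⟨kj, nj⟩ := rj
          have hmem : (kj, nj) ∈ K := List.mem_of_find?_eq_some hFK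
          have hprop := List.find?_some hFK
          simp only [Bool.and_eq_true, Bool.not_eq_true', List.isPrefixOf_iff_prefix,
            List.isEmpty_iff] at hprop
          obtain ⟨hkjne0, hkjp⟩ := hprop
          have hkjne : kj ≠ [] := by simpa [List.isEmpty_iff] using hkjne0
          obtain ⟨u, hu⟩ := hkjp
          have hstep : pvMulti [(k, n)] (c :: t) = kj ++ pvMulti [(k, n)] u := by
            rw [← hu]
            apply pvSkip
            intro p hp r hr hcon
            simp only [List.mem_singleton] at hr
            subst hr
            rcases pv_prefix_append_cases hcon with h1 | h1
            · -- k <+: kj.drop p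
              rcases Nat.eq_zero_or_pos p with hp0 | hp0
              · subst hp0
                simp only [List.drop_zero] at h1
                exact (hpair (kj, nj) hmem).2 h1
              · exact (hsufk (kj, nj) hmem p hp hp0).1 h1
            · rcases Nat.eq_zero_or_pos p with hp0 | hp0
              · subst hp0
                simp only [List.drop_zero] at h1
                exact (hpair (kj, nj) hmem).1 h1
              · exact (hsufk (kj, nj) hmem p hp hp0).2 h1
          have hulen : u.length ≤ N := by
            have := congrArg List.length hu
            simp at this hs
            have hk1 : 1 ≤ kj.length := by
              cases kj with | nil => exact absurd rfl hkjne | cons a b => simp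
            omega
          have hF2 : pvFirstRule K (kj ++ pvMulti [(k, n)] u) = some (kj, nj) :=
            pvFirstRule_mem hpw hmem hkjne (List.prefix_append kj _)
          have hkjne' : kj ++ pvMulti [(k, n)] u ≠ [] := by
            cases kj with | nil => exact absurd rfl hkjne | cons a b => simp
          have hstep2 : pvMulti K (kj ++ pvMulti [(k, n)] u) =
              nj ++ pvMulti K (pvMulti [(k, n)] u) := by
            rw [pvMulti_match hkjne' hF2 hkjne]
            simp [List.drop_left]
          have hF3 : pvFirstRule ((k, n) :: K) (c :: t) = some (kj, nj) := by
            rw [pvFirstRule, List.find?_cons]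
            have : (!k.isEmpty && k.isPrefixOf (c :: t)) = false := by
              have : k.isPrefixOf (c :: t) = false := by
                rw [Bool.eq_false_iff, Ne, List.isPrefixOf_iff_prefix]; exact hkp
              simp [this]
            rw [this]
            exact hFK
          rw [hstep, hstep2, ihN u hulen,
            pvMulti_match (by simp) hF3 hkjne, ← hu, List.drop_left]
        | none =>
          -- case C: no rule matches at the front; both scans copy one character
          have hF1 : pvFirstRule [(k, n)] (c :: t) = none := by
            apply pvFirstRule_none
            intro r hr
            simp only [List.mem_singleton] at hr
            subst hr
            exact hkp
          have hnoK : pvFirstRule K (c :: pvMulti [(k, n)] t) = none := by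
            apply pvFirstRule_none
            intro r hr hcon
            have hrne := hKne r hr
            have hcon' : r.1 <+: pvMulti [(k, n)] (c :: t) := by
              rw [pvMulti_nomatch hF1]
              exact hcon
            have hr1lt : 0 < r.1.length := List.length_pos_iff.mpr hrne
            have hpre := pvNoCreate k n K hk hsuf (c :: t).length (c :: t) r.1
              (le_refl _) ⟨r, hr, 0, hr1lt, by simp⟩ hcon'
            have hfind := List.find?_eq_none.mp hFK r hr
            have : (!r.1.isEmpty && r.1.isPrefixOf (c :: t)) = true := by
              simp [List.isPrefixOf_iff_prefix, hpre, hrne]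
            exact hfind this
          have hF3 : pvFirstRule ((k, n) :: K) (c :: t) = none := by
            rw [pvFirstRule, List.find?_cons]
            have : (!k.isEmpty && k.isPrefixOf (c :: t)) = false := by
              have : k.isPrefixOf (c :: t) = false := by
                rw [Bool.eq_false_iff, Ne, List.isPrefixOf_iff_prefix]; exact hkp
              simp [this]
            rw [this]
            exact hFK
          have hlt : t.length ≤ N := by simp at hs; omega
          rw [pvMulti_nomatch hF1, pvMulti_nomatch hnoK, ihN t hlt,
            pvMulti_nomatch hF3]

-- Python's str.replace (PySem's fueled scanner) is the single-rule instance of pvMulti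
theorem pvGo_eq (old new : List Char) (hold : old ≠ []) :
    ∀ (fuel : Nat) (l acc : List Char), l.length ≤ fuel →
      PySem.Chars.replace.go old new fuel l acc = acc.reverse ++ pvMulti [(old, new)] l := by
  intro fuel
  induction fuel with
  | zero =>
    intro l acc hl
    have : l = [] := by cases l <;> simp_all
    subst this
    simp [PySem.Chars.replace.go, pvMulti_nil]
  | succ fuel ih =>
    intro l acc hl
    cases l with
    | nil => simp [PySem.Chars.replace.go, pvMulti_nil]
    | cons c t =>
      rw [PySem.Chars.replace.go]
      by_cases hp : old.isPrefixOf (c :: t)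
      · simp only [hp, if_true]
        have hlen : (List.drop old.length (c :: t)).length ≤ fuel := by
          have h1 : 1 ≤ old.length := by
            cases old with | nil => exact absurd rfl hold | cons a b => simp
          simp [List.length_drop]
          simp at hl
          omega
        rw [ih _ _ hlen]
        have hF : pvFirstRule [(old, new)] (c :: t) = some (old, new) := by
          rw [pvFirstRule, List.find?_cons]
          have : (!old.isEmpty && old.isPrefixOf (c :: t)) = true := by
            simp [hp, List.isEmpty_iff, hold]
          simp only [this]
        rw [pvMulti_match (by simp) hF hold]
        simp
      · simp only [hp, if_false]
        have hlen : t.length ≤ fuel := by simp at hl; omega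
        rw [ih _ _ hlen]
        have hF : pvFirstRule [(old, new)] (c :: t) = none := by
          apply pvFirstRule_none
          intro r hr
          simp only [List.mem_singleton] at hr
          subst hr
          rw [← List.isPrefixOf_iff_prefix]
          simp [hp]
        rw [pvMulti_nomatch hF]
        simp

theorem pvReplace_eq (old new : List Char) (hold : old ≠ []) (s : List Char) :
    PySem.Chars.replace s old new = pvMulti [(old, new)] s := by
  rw [PySem.Chars.replace]
  have : old.isEmpty = false := by simp [List.isEmpty_iff, hold]
  rw [this]
  simpa using pvGo_eq old new hold s.length s [] (le_refl _)

-- the concrete rule pairs (as char lists)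
def pvR1 : List Char × List Char := ("actions/checkout@v1".toList, "actions/checkout@v4".toList)
def pvR2 : List Char × List Char := ("actions/checkoout@v2".toList, "actions/checkout@v4".toList)
def pvR3 : List Char × List Char := ("actions/setup-node@v1".toList, "actions/setup-node@v4".toList)
def pvR4 : List Char × List Char := ("actions/upload-artifact@v1".toList, "actions/upload-artifact@v4".toList)
def pvR5 : List Char × List Char := ("actions/download-artifact@v1".toList, "actions/download-artifact@v4".toList)

-- ===== VERDICT (by name: the statement is the Claim_ definition above) =====
theorem fix_outdated_action_spec : Claim_equal_fix_outdated_action := by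
  intro config_content platform _
  unfold Spec_fix_outdated_action fix_outdated_action fix_outdated_action_alt
  simp only [List.foldl, PySem.Str.replace, String.toList_ofList]
  have e45 : ∀ x : List Char,
      pvMulti [pvR5] (pvMulti [pvR4] x) = pvMulti [pvR4, pvR5] x := fun x =>
    pvM pvR4.1 pvR4.2 [pvR5] (by decide) (by decide) (by decide) (by decide)
      (by decide) (by decide) (by decide) x.length x (le_refl _)
  have e345 : ∀ x : List Char,
      pvMulti [pvR4, pvR5] (pvMulti [pvR3] x) = pvMulti [pvR3, pvR4, pvR5] x := fun x =>
    pvM pvR3.1 pvR3.2 [pvR4, pvR5] (by decide) (by decide) (by decide) (by decide)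
      (by decide) (by decide) (by decide) x.length x (le_refl _)
  have e2345 : ∀ x : List Char,
      pvMulti [pvR3, pvR4, pvR5] (pvMulti [pvR2] x) = pvMulti [pvR2, pvR3, pvR4, pvR5] x := fun x =>
    pvM pvR2.1 pvR2.2 [pvR3, pvR4, pvR5] (by decide) (by decide) (by decide) (by decide)
      (by decide) (by decide) (by decide) x.length x (le_refl _)
  have e12345 : ∀ x : List Char,
      pvMulti [pvR2, pvR3, pvR4, pvR5] (pvMulti [pvR1] x) = pvMulti pvRules x := fun x =>
    pvM pvR1.1 pvR1.2 [pvR2, pvR3, pvR4, pvR5] (by decide) (by decide) (by decide) (by decide)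
      (by decide) (by decide) (by decide) x.length x (le_refl _)
  simp only [pvR1, pvR2, pvR3, pvR4, pvR5] at e45 e345 e2345 e12345
  rw [pvReplace_eq "actions/checkout@v1".toList "actions/checkout@v4".toList (by decide),
    pvReplace_eq "actions/checkoout@v2".toList "actions/checkout@v4".toList (by decide),
    pvReplace_eq "actions/setup-node@v1".toList "actions/setup-node@v4".toList (by decide),
    pvReplace_eq "actions/upload-artifact@v1".toList "actions/upload-artifact@v4".toList (by decide),
    pvReplace_eq "actions/download-artifact@v1".toList "actions/download-artifact@v4".toList (by decide),
    e45, e345, e2345, e12345]
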